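-- pv_equiv track=rewrite | github.com/HardikGandhi2712/first-repository | python-eg/class str 1.py | emailisvalid
-- ===== SOURCE A (Python) =====
-- def emailisvalid(email):
--     idx=email.rfind('.')
--     if idx==-1:
--         return False
--     for i in range(idx+1,len(email)):
--         if email[i].isdigit():
--             return False
--     return True
-- ===== SOURCE B (Python) =====
-- def emailisvalid(email):
--     # single backward scan: first '.' from the end is the last dot;
--     # a digit seen before it lies after the last dot
--     for c in reversed(email):
--         if c.isdigit():
--             return False
--         if c == '.':
--             return True
--     return False
-- ===== Notes on version B (the rewrite author's own statement) =====
-- stated objective: alternative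
-- what changed: Fuses A's two phases (rfind for the last dot, then a forward index loop over the suffix) into one backward scan over the characters that returns False at the first digit and True at the first dot.
import Mathlib
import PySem

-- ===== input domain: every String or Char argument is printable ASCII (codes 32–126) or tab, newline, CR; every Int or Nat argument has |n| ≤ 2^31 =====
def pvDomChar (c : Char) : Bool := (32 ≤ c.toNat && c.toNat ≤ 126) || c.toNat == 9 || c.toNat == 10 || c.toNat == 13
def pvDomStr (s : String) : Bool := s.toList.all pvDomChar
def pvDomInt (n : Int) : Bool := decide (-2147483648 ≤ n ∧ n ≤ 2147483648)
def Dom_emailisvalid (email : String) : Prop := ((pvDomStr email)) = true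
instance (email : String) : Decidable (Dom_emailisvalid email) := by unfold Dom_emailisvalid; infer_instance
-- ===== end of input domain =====

-- B replaces A's two phases (rfind, then a forward loop over the suffix) by one backward scan; equal return values, no side effects.

-- ===== PORT A =====
-- idx = email.rfind('.'); if idx == -1: return False;
-- for i in range(idx+1, len(email)): if email[i].isdigit(): return False; return True
-- (email[i] ported with pyGetD: every i produced by the range is a valid index)
def emailisvalid (email : String) : Bool :=
  let idx := PySem.Str.rfind email "."
  if idx = -1 then false
  else if (PySem.List.pyRange (idx + 1) (PySem.Str.len email) 1).any
            (fun i => PySem.Chars.isdigit (PySem.List.pyGetD email.toList i ' ')) then false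
  else true

-- ===== PORT B =====
-- for c in reversed(email): if c.isdigit(): return False; if c == '.': return True; return False
def scanB : List Char → Bool
  | [] => false
  | c :: rest =>
      if PySem.Chars.isdigit c then false
      else if c == '.' then true
      else scanB rest

def emailisvalid_alt (email : String) : Bool := scanB email.toList.reverse

-- ===== PRECONDITION & SPEC =====
def Spec_emailisvalid (email : String) (out : Bool) : Prop := out = emailisvalid_alt email
instance (email : String) (out : Bool) : Decidable (Spec_emailisvalid email out) := by unfold Spec_emailisvalid; infer_instance

-- ===== CLAIM (what is proved, stated in full; the proofs are below) =====
def Claim_equal_emailisvalid : Prop := ∀ (email : String), Dom_emailisvalid email → Spec_emailisvalid email (emailisvalid email)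

-- ===== LEMMAS AND PROOFS =====

-- one unfolding step of rfind's scanner (zero and successor cases in one statement)
lemma go_eq (s sub : List Char) (j : Nat) :
    PySem.Chars.rfind.go s sub j =
      if sub.isPrefixOf (s.drop j) then (j : Int)
      else match j with | 0 => -1 | Nat.succ i => PySem.Chars.rfind.go s sub i := by
  cases j <;> simp [PySem.Chars.rfind.go]

lemma go_neg_one_le (cs : List Char) (sub : List Char) (j : Nat) :
    -1 ≤ PySem.Chars.rfind.go cs sub j := by
  induction j with
  | zero =>
      rw [go_eq]
      split
      · omega
      · exact le_refl (-1)
  | succ j ih =>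
      rw [go_eq]
      split
      · omega
      · exact ih

-- appending a non-dot character does not change where '.' is last found
lemma go_append_ne (cs : List Char) (c : Char) (h : c ≠ '.') :
    ∀ j, j ≤ cs.length →
      PySem.Chars.rfind.go (cs ++ [c]) ['.'] j = PySem.Chars.rfind.go cs ['.'] j := by
  intro j
  induction j with
  | zero =>
      intro _
      rw [go_eq, go_eq]
      simp only [List.drop_zero]
      have : (['.'].isPrefixOf (cs ++ [c])) = (['.'].isPrefixOf cs) := by
        cases cs with
        | nil => simp [List.isPrefixOf]; exact fun hc => h hc.symm
        | cons a t => simp [List.isPrefixOf]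
      rw [this]
  | succ j ih =>
      intro hj
      rw [go_eq, go_eq]
      rw [List.drop_append_of_le_length hj]
      have hdrop : ['.'].isPrefixOf (cs.drop (j+1) ++ [c]) = ['.'].isPrefixOf (cs.drop (j+1)) := by
        cases hcase : cs.drop (j+1) with
        | nil => simp [List.isPrefixOf]; exact fun hc => h hc.symm
        | cons a t => simp [List.isPrefixOf]
      rw [hdrop]
      split
      · rfl
      · exact ih (by omega)

lemma rfind_append_ne (cs : List Char) (c : Char) (h : c ≠ '.') :
    PySem.Chars.rfind (cs ++ [c]) ['.'] = PySem.Chars.rfind cs ['.'] := by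
  simp only [PySem.Chars.rfind, List.length_append, List.length_singleton]
  rw [go_eq]
  have hnil : (cs ++ [c]).drop (cs.length + 1) = [] := by
    apply List.drop_eq_nil_of_le; simp
  rw [hnil]
  simp only [List.isPrefixOf, Bool.false_eq_true, if_false]
  exact go_append_ne cs c h cs.length le_rfl

lemma rfind_append_dot (cs : List Char) :
    PySem.Chars.rfind (cs ++ ['.']) ['.'] = (cs.length : Int) := by
  simp only [PySem.Chars.rfind, List.length_append, List.length_singleton]
  rw [go_eq]
  have hnil : (cs ++ ['.']).drop (cs.length + 1) = [] := by
    apply List.drop_eq_nil_of_le; simp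
  rw [hnil]
  simp only [List.isPrefixOf, Bool.false_eq_true, if_false]
  rw [go_eq]
  have hdot : (cs ++ ['.']).drop cs.length = ['.'] := by
    simp [List.drop_append_of_le_length (le_refl cs.length)]
  rw [hdot]
  simp [List.isPrefixOf]

-- a found index points at a real '.': nonnegative and below the length
lemma go_found (cs : List Char) (j : Nat) (h : PySem.Chars.rfind.go cs ['.'] j ≠ -1) :
    0 ≤ PySem.Chars.rfind.go cs ['.'] j ∧ (PySem.Chars.rfind.go cs ['.'] j) < (cs.length : Int) := by
  induction j with
  | zero =>
      rw [go_eq] at h ⊢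
      simp only [List.drop_zero] at h ⊢
      split at h <;> split
      · rename_i hp _
        cases cs with
        | nil => simp [List.isPrefixOf] at hp
        | cons a t => constructor <;> simp
      · rename_i hp hq; exact absurd hp hq
      · rename_i hp hq; exact absurd hq hp
      · exact absurd rfl h
  | succ j ih =>
      rw [go_eq] at h ⊢
      split at h <;> split
      · rename_i hp _
        have hlt : j + 1 < cs.length := by
          by_contra hge
          rw [List.drop_eq_nil_of_le (by omega)] at hp
          simp [List.isPrefixOf] at hp
        constructor
        · omega
        · exact_mod_cast hlt
      · rename_i hp hq; exact absurd hp hq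
      · rename_i hp hq; exact absurd hq hp
      · exact ih h

-- A's body expressed over the character list, with the index loop reduced to the suffix
def Abody (cs : List Char) : Bool :=
  let idx := PySem.Chars.rfind cs ['.']
  if idx = -1 then false
  else if ((cs.drop (idx + 1).toNat).any PySem.Chars.isdigit) then false
  else true

lemma emailisvalid_eq_Abody (email : String) : emailisvalid email = Abody email.toList := by
  simp only [emailisvalid, Abody, PySem.Str.rfind_eq, PySem.Str.len_eq]
  have hs : ("." : String).toList = ['.'] := by decide
  simp only [hs]
  set idx := PySem.Chars.rfind email.toList ['.'] with hidx
  by_cases h : idx = -1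
  · simp [h]
  · have h0 : (0 : Int) ≤ idx + 1 := by
      have := go_neg_one_le email.toList ['.'] email.toList.length
      simp only [PySem.Chars.rfind] at hidx
      omega
    have hmap := PySem.List.map_pyGetD_pyRange' email.toList ' ' h0
    have hany : (PySem.List.pyRange (idx + 1) (email.toList.length : Int) 1).any
          (fun i => PySem.Chars.isdigit (PySem.List.pyGetD email.toList i ' '))
        = ((email.toList.drop (idx + 1).toNat).any PySem.Chars.isdigit) := by
      rw [← hmap, List.any_map]
      rfl
    simp only [h, if_false, hany]

-- the core equivalence: A's two-phase body equals B's single backward scan, by snoc induction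
lemma Abody_eq_scanB (cs : List Char) : Abody cs = scanB cs.reverse := by
  induction cs using List.reverseRecOn with
  | nil => simp [Abody, scanB, PySem.Chars.rfind, PySem.Chars.rfind.go, List.isPrefixOf]
  | append_singleton cs c ih =>
      rw [List.reverse_append]
      simp only [List.reverse_singleton, List.singleton_append, scanB]
      by_cases hdig : PySem.Chars.isdigit c
      · -- c is a digit (hence not '.'): both sides are false
        have hne : c ≠ '.' := by rintro rfl; exact absurd hdig (by decide)
        simp only [hdig, if_true]
        simp only [Abody, rfind_append_ne cs c hne]
        set idx := PySem.Chars.rfind cs ['.'] with hidx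
        by_cases h : idx = -1
        · simp [h]
        · have hf := go_found cs cs.length (by simpa [PySem.Chars.rfind, ← hidx] using h)
          simp only [PySem.Chars.rfind] at hidx
          have hle : (idx + 1).toNat ≤ cs.length := by omega
          rw [List.drop_append_of_le_length hle]
          simp [h, hdig]
      · simp only [hdig]
        by_cases hdot : c = '.'
        · -- c is the (new) last dot: nothing after it, both sides true
          subst hdot
          simp only [beq_self_eq_true, if_true]
          simp only [Abody, rfind_append_dot]
          have hne : (cs.length : Int) ≠ -1 := by omega
          simp [hne]
        · -- c is neither digit nor dot: appending it changes nothing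
          have hbeq : (c == '.') = false := by simp [hdot]
          rw [hbeq]
          simp only [Bool.false_eq_true, if_false, ← ih]
          simp only [Abody, rfind_append_ne cs c hdot]
          set idx := PySem.Chars.rfind cs ['.'] with hidx
          by_cases h : idx = -1
          · simp [h]
          · have hf := go_found cs cs.length (by simpa [PySem.Chars.rfind, ← hidx] using h)
            simp only [PySem.Chars.rfind] at hidx
            have hle : (idx + 1).toNat ≤ cs.length := by omega
            rw [List.drop_append_of_le_length hle]
            simp [h, hdig]

-- ===== VERDICT (by name: the statement is the Claim_ definition above) =====
theorem emailisvalid_spec : Claim_equal_emailisvalid := by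
  intro email _
  unfold Spec_emailisvalid emailisvalid_alt
  rw [emailisvalid_eq_Abody, Abody_eq_scanB]
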